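-- pv_equiv track=rewrite | github.com/Imraj-Rabbani/BRACU-CSE221 | Lab_4/task6.py | dfs
-- ===== SOURCE A (Python) =====
-- def dfs(grid, row, col, visited):
--     if row < 0 or col < 0 or row >= len(grid) or col >= len(grid[0]) or grid[row][col] == '#' or visited[row][col]:
--         return 0
--
--     if grid[row][col] == 'D':
--         diamonds = 1
--     else:
--         diamonds = 0
--     visited[row][col] = 1
--
--     for dr, dc in [(0, 1), (1, 0), (0, -1), (-1, 0)]:
--         diamonds += dfs(grid, row + dr, col + dc, visited)
--
--     return diamonds
-- ===== SOURCE B (Python) =====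
-- def dfs(grid, row, col, visited):
--     # Iterative flood fill with an explicit stack (return value only; mutates visited like A).
--     stack = [(row, col)]
--     diamonds = 0
--     while stack:
--         r, c = stack.pop()
--         if r < 0 or c < 0 or r >= len(grid) or c >= len(grid[0]) or grid[r][c] == '#' or visited[r][c]:
--             continue
--         if grid[r][c] == 'D':
--             diamonds += 1
--         visited[r][c] = 1
--         stack.append((r - 1, c))
--         stack.append((r, c - 1))
--         stack.append((r + 1, c))
--         stack.append((r, c + 1))
--     return diamonds
-- ===== Notes on version B (the rewrite author's own statement) =====
-- stated objective: alternative
-- what changed: Replaces the recursive four-way DFS with an iterative flood fill over an explicit LIFO stack (neighbors pushed in reverse order, guard applied at pop time), accumulating the diamond count in a loop variable instead of summing recursive results.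
-- outside the precondition, e.g. on dfs([['D', '#']], 0, 0, [[0]]): A returns 1, B returns 1
import Mathlib
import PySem

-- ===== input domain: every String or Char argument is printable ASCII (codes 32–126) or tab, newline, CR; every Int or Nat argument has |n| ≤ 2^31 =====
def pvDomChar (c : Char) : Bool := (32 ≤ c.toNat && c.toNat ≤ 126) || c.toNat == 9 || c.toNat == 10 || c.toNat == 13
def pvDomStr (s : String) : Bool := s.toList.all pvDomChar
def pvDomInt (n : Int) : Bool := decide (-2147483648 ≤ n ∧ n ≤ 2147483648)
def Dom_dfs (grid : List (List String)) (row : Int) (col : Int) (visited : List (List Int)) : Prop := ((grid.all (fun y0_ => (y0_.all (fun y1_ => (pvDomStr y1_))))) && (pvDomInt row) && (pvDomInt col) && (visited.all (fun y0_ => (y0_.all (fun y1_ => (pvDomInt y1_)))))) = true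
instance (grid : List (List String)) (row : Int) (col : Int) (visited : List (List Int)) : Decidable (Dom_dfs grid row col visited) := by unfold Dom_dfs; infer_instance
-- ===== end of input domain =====

-- B replaces A's recursive four-way DFS by an iterative flood fill over an explicit stack
-- (same guard, neighbors pushed in reverse order so pops follow A's order); return-value
-- equivalence only is proved — both Pythons also mutate `visited` in place, identically.

-- number of cells still holding 0 in `visited`: the fuel bound under which both
-- fuelled ports agree with their (unfuelled, terminating) Pythons
def pvZeros (v : List (List Int)) : Nat := (v.map (fun row => row.count 0)).sum

-- the common lookup chain grid[r][c] / visited[r][c]; none = the Python IndexError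
-- (outside Pre_), which both ports treat as a blocked cell via getD ("", 1)
def pvProbe (grid : List (List String)) (visited : List (List Int)) (r c : Int) :
    Option (String × Int) :=
  match PySem.List.pyGet? grid r with
  | none => none
  | some grow =>
    match PySem.List.pyGet? grow c with
    | none => none
    | some cell =>
      match PySem.List.pyGet? visited r with
      | none => none
      | some vrow =>
        match PySem.List.pyGet? vrow c with
        | none => none
        | some vv => some (cell, vv)

-- ===== PORT A =====
-- A, with `visited` threaded (Python mutates it in place) and fuel = pvZeros visited,
-- which each guard-passing call strictly decreases, so the fuel=0 branch is never the
-- one taken where the Python returns.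
def dfsAuxA (fuel : Nat) (grid : List (List String)) (row col : Int)
    (visited : List (List Int)) : Int × List (List Int) :=
  if row < 0 ∨ col < 0 ∨ (grid.length : Int) ≤ row ∨ ((grid.headD []).length : Int) ≤ col then
    (0, visited)
  else if ((pvProbe grid visited row col).getD ("", 1)).1 = "#" ∨
      ((pvProbe grid visited row col).getD ("", 1)).2 ≠ 0 then (0, visited)
  else
    match fuel with
    | 0 => (0, visited)  -- unreachable when fuel ≥ pvZeros visited
    | f + 1 =>
        let d0 : Int := if ((pvProbe grid visited row col).getD ("", 1)).1 = "D" then 1 else 0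
        let v1 := visited.modify row.toNat (fun rw => rw.set col.toNat 1)
        let r1 := dfsAuxA f grid row (col + 1) v1
        let r2 := dfsAuxA f grid (row + 1) col r1.2
        let r3 := dfsAuxA f grid row (col - 1) r2.2
        let r4 := dfsAuxA f grid (row - 1) col r3.2
        (d0 + r1.1 + r2.1 + r3.1 + r4.1, r4.2)

def dfs (grid : List (List String)) (row : Int) (col : Int) (visited : List (List Int)) : Int :=
  (dfsAuxA (pvZeros visited) grid row col visited).1

-- ===== PORT B =====
-- B's while loop: pop a cell, continue on the guard, otherwise count it, mark it and
-- push the four neighbors; fuel is consumed only by guard-passing pops (each zeroes a cell).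
def dfsLoopB (fuel : Nat) (grid : List (List String)) (stack : List (Int × Int))
    (visited : List (List Int)) (acc : Int) : Int :=
  match stack with
  | [] => acc
  | (r, c) :: st =>
    if r < 0 ∨ c < 0 ∨ (grid.length : Int) ≤ r ∨ ((grid.headD []).length : Int) ≤ c then
      dfsLoopB fuel grid st visited acc
    else if ((pvProbe grid visited r c).getD ("", 1)).1 = "#" ∨
        ((pvProbe grid visited r c).getD ("", 1)).2 ≠ 0 then dfsLoopB fuel grid st visited acc
    else
      match fuel with
      | 0 => acc  -- unreachable when fuel ≥ pvZeros visited
      | f + 1 =>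
        dfsLoopB f grid ((r, c + 1) :: (r + 1, c) :: (r, c - 1) :: (r - 1, c) :: st)
          (visited.modify r.toNat (fun rw => rw.set c.toNat 1))
          (acc + if ((pvProbe grid visited r c).getD ("", 1)).1 = "D" then 1 else 0)
termination_by (fuel, stack.length)

def dfs_alt (grid : List (List String)) (row : Int) (col : Int) (visited : List (List Int)) : Int :=
  dfsLoopB (pvZeros visited) grid [(row, col)] visited 0

-- ===== PRECONDITION & SPEC =====
-- Pre_ excludes ragged inputs on which A's DFS reaches a cell missing from a short grid or
-- visited row and raises IndexError: it admits rectangular-shaped inputs (every grid row and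
-- every used visited row at least as long as grid[0], a visited row per grid row) and, on any
-- shape, starts that return 0 from the guard alone (out of bounds, '#', or already visited);
-- A also returns on some ragged inputs whose flooded region happens to avoid the missing cells.
def Pre_dfs (grid : List (List String)) (row : Int) (col : Int) (visited : List (List Int)) : Prop :=
  (grid.length ≤ visited.length ∧
   (∀ gr ∈ grid, (grid.headD []).length ≤ gr.length) ∧
   (∀ vr ∈ visited.take grid.length, (grid.headD []).length ≤ vr.length)) ∨
  (row < 0 ∨ col < 0 ∨ (grid.length : Int) ≤ row ∨ ((grid.headD []).length : Int) ≤ col) ∨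
  ((PySem.List.pyGet? grid row).bind (fun gr => PySem.List.pyGet? gr col) = some "#") ∨
  (((PySem.List.pyGet? grid row).bind (fun gr => PySem.List.pyGet? gr col)).isSome ∧
   ((PySem.List.pyGet? visited row).bind (fun vr => PySem.List.pyGet? vr col)).isSome ∧
   ((PySem.List.pyGet? visited row).bind (fun vr => PySem.List.pyGet? vr col)).getD 0 ≠ 0)
instance (grid : List (List String)) (row : Int) (col : Int) (visited : List (List Int)) : Decidable (Pre_dfs grid row col visited) := by unfold Pre_dfs; infer_instance

def pvWitness_dfs : List (List String) × Int × Int × List (List Int) :=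
  ([[".", "D"], ["#", "D"]], 0, 0, [[0, 0], [0, 0]])

def Spec_dfs (grid : List (List String)) (row : Int) (col : Int) (visited : List (List Int)) (out : Int) : Prop := out = dfs_alt grid row col visited
instance (grid : List (List String)) (row : Int) (col : Int) (visited : List (List Int)) (out : Int) : Decidable (Spec_dfs grid row col visited out) := by unfold Spec_dfs; infer_instance

-- ===== CLAIM (what is proved, stated in full; the proofs are below) =====
def Claim_equal_dfs : Prop := ∀ (grid : List (List String)) (row : Int) (col : Int) (visited : List (List Int)), Dom_dfs grid row col visited → Pre_dfs grid row col visited → Spec_dfs grid row col visited (dfs grid row col visited)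

-- ===== LEMMAS AND PROOFS =====

theorem pvZeros_cons (a : List Int) (v : List (List Int)) :
    pvZeros (a :: v) = a.count 0 + pvZeros v := by
  simp [pvZeros]

theorem count_set_zero (l : List Int) (m : Nat) (h : l[m]? = some 0) :
    (l.set m 1).count 0 + 1 = l.count 0 := by
  induction l generalizing m with
  | nil => simp at h
  | cons a tl ih =>
    cases m with
    | zero =>
      simp at h
      simp [h]
    | succ m =>
      simp at h
      simp [List.count_cons, ← ih m h]
      omega

theorem pvZeros_mark (v : List (List Int)) (n m : Nat) (vrow : List Int)
    (h1 : v[n]? = some vrow) (h2 : vrow[m]? = some 0) :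
    pvZeros (v.modify n (fun rw => rw.set m 1)) + 1 = pvZeros v := by
  induction v generalizing n with
  | nil => simp at h1
  | cons a tl ih =>
    cases n with
    | zero =>
      simp at h1
      subst h1
      have hm : (a :: tl).modify 0 (fun rw => rw.set m 1) = a.set m 1 :: tl := by
        simp [List.modify]
      rw [hm, pvZeros_cons, pvZeros_cons]
      have := count_set_zero a m h2
      omega
    | succ n =>
      simp at h1
      have hm : (a :: tl).modify (n + 1) (fun rw => rw.set m 1) =
          a :: tl.modify n (fun rw => rw.set m 1) := by
        simp [List.modify]
      rw [hm, pvZeros_cons, pvZeros_cons]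
      have := ih n h1
      omega

theorem pvProbe_inv (grid : List (List String)) (visited : List (List Int)) (r c : Int)
    (cell : String) (vv : Int) (h : pvProbe grid visited r c = some (cell, vv)) :
    ∃ vrow, PySem.List.pyGet? visited r = some vrow ∧ PySem.List.pyGet? vrow c = some vv := by
  unfold pvProbe at h
  cases hg : PySem.List.pyGet? grid r <;> simp [hg] at h
  case some grow =>
    cases hc : PySem.List.pyGet? grow c <;> simp [hc] at h
    case some cell' =>
      cases hv : PySem.List.pyGet? visited r <;> simp [hv] at h
      case some vrow =>
        cases hw : PySem.List.pyGet? vrow c <;> simp [hw] at h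
        case some vv' =>
          exact ⟨vrow, rfl, by rw [hw, h.2]⟩

theorem pvGuardFacts {grid : List (List String)} {r c : Int}
    (h : ¬(r < 0 ∨ c < 0 ∨ (grid.length : Int) ≤ r ∨ ((grid.headD []).length : Int) ≤ c)) :
    0 ≤ r ∧ 0 ≤ c := by
  constructor <;> by_contra h' <;> apply h
  · exact Or.inl (by omega)
  · exact Or.inr (Or.inl (by omega))

-- a cell that passes the whole guard is an in-range 0 of `visited`; marking it
-- removes exactly one zero
theorem pvZeros_mark_of_pass (grid : List (List String)) (visited : List (List Int)) (r c : Int)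
    (hguard : ¬(r < 0 ∨ c < 0 ∨ (grid.length : Int) ≤ r ∨ ((grid.headD []).length : Int) ≤ c))
    (hblock : ¬(((pvProbe grid visited r c).getD ("", 1)).1 = "#" ∨
                ((pvProbe grid visited r c).getD ("", 1)).2 ≠ 0)) :
    pvZeros (visited.modify r.toNat (fun rw => rw.set c.toNat 1)) + 1 = pvZeros visited := by
  obtain ⟨hr, hc⟩ := pvGuardFacts hguard
  rcases hp : pvProbe grid visited r c with _ | ⟨cell, vv⟩
  · rw [hp] at hblock
    simp at hblock
  · rw [hp] at hblock
    simp only [Option.getD_some, not_or, not_ne_iff] at hblock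
    obtain ⟨vrow, hv, hw⟩ := pvProbe_inv grid visited r c cell vv hp
    rw [PySem.List.pyGet?_of_nonneg _ hr] at hv
    rw [PySem.List.pyGet?_of_nonneg _ hc] at hw
    rw [hblock.2] at hw
    exact pvZeros_mark visited r.toNat c.toNat vrow hv hw

theorem dfsAuxA_zeros_le (fuel : Nat) (grid : List (List String)) (row col : Int)
    (visited : List (List Int)) :
    pvZeros (dfsAuxA fuel grid row col visited).2 ≤ pvZeros visited := by
  induction fuel generalizing row col visited with
  | zero =>
    unfold dfsAuxA
    split
    · simp
    · split
      · simp
      · simp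
  | succ f ih =>
    unfold dfsAuxA
    split
    · simp
    next hguard =>
      split
      · simp
      next hblock =>
        have hm := pvZeros_mark_of_pass grid visited row col hguard hblock
        simp only []
        have h1 := ih row (col + 1) (visited.modify row.toNat fun rw => rw.set col.toNat 1)
        have h2 := ih (row + 1) col
          (dfsAuxA f grid row (col + 1) (visited.modify row.toNat fun rw => rw.set col.toNat 1)).2
        have h3 := ih row (col - 1)
          (dfsAuxA f grid (row + 1) col
            (dfsAuxA f grid row (col + 1) (visited.modify row.toNat fun rw => rw.set col.toNat 1)).2).2
        have h4 := ih (row - 1) col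
          (dfsAuxA f grid row (col - 1)
            (dfsAuxA f grid (row + 1) col
              (dfsAuxA f grid row (col + 1)
                (visited.modify row.toNat fun rw => rw.set col.toNat 1)).2).2).2
        omega

-- one step of the loop on a popped cell that fails some part of the guard
theorem dfsLoopB_cons_skip (fuel : Nat) (grid : List (List String)) (r c : Int)
    (st : List (Int × Int)) (visited : List (List Int)) (acc : Int)
    (h : (r < 0 ∨ c < 0 ∨ (grid.length : Int) ≤ r ∨ ((grid.headD []).length : Int) ≤ c) ∨
         (((pvProbe grid visited r c).getD ("", 1)).1 = "#" ∨
          ((pvProbe grid visited r c).getD ("", 1)).2 ≠ 0)) :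
    dfsLoopB fuel grid ((r, c) :: st) visited acc = dfsLoopB fuel grid st visited acc := by
  rw [dfsLoopB.eq_def]
  simp only []
  rcases h with h | h
  · rw [if_pos h]
  · by_cases hg : r < 0 ∨ c < 0 ∨ (grid.length : Int) ≤ r ∨ ((grid.headD []).length : Int) ≤ c
    · rw [if_pos hg]
    · rw [if_neg hg, if_pos h]

-- one step of the loop on a popped cell that passes the whole guard
theorem dfsLoopB_cons_pass (f : Nat) (grid : List (List String)) (r c : Int)
    (st : List (Int × Int)) (visited : List (List Int)) (acc : Int)
    (hguard : ¬(r < 0 ∨ c < 0 ∨ (grid.length : Int) ≤ r ∨ ((grid.headD []).length : Int) ≤ c))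
    (hblock : ¬(((pvProbe grid visited r c).getD ("", 1)).1 = "#" ∨
                ((pvProbe grid visited r c).getD ("", 1)).2 ≠ 0)) :
    dfsLoopB (f + 1) grid ((r, c) :: st) visited acc =
      dfsLoopB f grid ((r, c + 1) :: (r + 1, c) :: (r, c - 1) :: (r - 1, c) :: st)
        (visited.modify r.toNat (fun rw => rw.set c.toNat 1))
        (acc + if ((pvProbe grid visited r c).getD ("", 1)).1 = "D" then 1 else 0) := by
  rw [dfsLoopB.eq_def]
  simp only []
  rw [if_neg hguard, if_neg hblock]

-- fuel 0 on a cell that passes the guard is impossible when fuel bounds pvZeros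
theorem dfsLoopB_fuel_irrel (f1 : Nat) (grid : List (List String)) (stack : List (Int × Int))
    (visited : List (List Int)) (acc : Int) :
    ∀ f2, pvZeros visited ≤ f1 → pvZeros visited ≤ f2 →
    dfsLoopB f1 grid stack visited acc = dfsLoopB f2 grid stack visited acc := by
  induction f1, stack, visited, acc using dfsLoopB.induct grid with
  | case1 fuel visited acc =>
    intro f2 _ _
    rw [dfsLoopB, dfsLoopB]
  | case2 fuel visited acc r c st hguard ih =>
    intro f2 h1 h2
    rw [dfsLoopB_cons_skip _ _ _ _ _ _ _ (Or.inl hguard),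
        dfsLoopB_cons_skip _ _ _ _ _ _ _ (Or.inl hguard)]
    exact ih f2 h1 h2
  | case3 fuel visited acc r c st hguard hblock ih =>
    intro f2 h1 h2
    rw [dfsLoopB_cons_skip _ _ _ _ _ _ _ (Or.inr hblock),
        dfsLoopB_cons_skip _ _ _ _ _ _ _ (Or.inr hblock)]
    exact ih f2 h1 h2
  | case4 visited acc r c st hguard hblock =>
    intro f2 h1 h2
    exfalso
    have hm := pvZeros_mark_of_pass grid visited r c hguard hblock
    omega
  | case5 visited acc r c st hguard hblock f ih =>
    intro f2 h1 h2
    have hm := pvZeros_mark_of_pass grid visited r c hguard hblock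
    obtain ⟨f2', rfl⟩ : ∃ f2', f2 = f2' + 1 := ⟨f2 - 1, by omega⟩
    rw [dfsLoopB_cons_pass f grid r c st visited acc hguard hblock,
        dfsLoopB_cons_pass f2' grid r c st visited acc hguard hblock]
    exact ih f2' (by omega) (by omega)

theorem dfs_main (f : Nat) (grid : List (List String)) (r c : Int) (visited : List (List Int))
    (st : List (Int × Int)) (acc : Int) (hf : pvZeros visited ≤ f) :
    dfsLoopB f grid ((r, c) :: st) visited acc =
      dfsLoopB f grid st (dfsAuxA f grid r c visited).2 (acc + (dfsAuxA f grid r c visited).1) := by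
  induction f generalizing r c visited st acc with
  | zero =>
    unfold dfsAuxA
    split
    next hguard =>
      rw [dfsLoopB_cons_skip _ _ _ _ _ _ _ (Or.inl hguard)]
      simp
    next hguard =>
      split
      next hblock =>
        rw [dfsLoopB_cons_skip _ _ _ _ _ _ _ (Or.inr hblock)]
        simp
      next hblock =>
        exfalso
        have hm := pvZeros_mark_of_pass grid visited r c hguard hblock
        omega
  | succ f ih =>
    unfold dfsAuxA
    split
    next hguard =>
      rw [dfsLoopB_cons_skip _ _ _ _ _ _ _ (Or.inl hguard)]
      simp
    next hguard =>
      split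
      next hblock =>
        rw [dfsLoopB_cons_skip _ _ _ _ _ _ _ (Or.inr hblock)]
        simp
      next hblock =>
        have hm := pvZeros_mark_of_pass grid visited r c hguard hblock
        rw [dfsLoopB_cons_pass f grid r c st visited acc hguard hblock]
        simp only []
        rw [ih r (c + 1) _ _ _ (by omega)]
        rw [ih (r + 1) c _ _ _ (le_trans (dfsAuxA_zeros_le _ _ _ _ _) (by omega))]
        rw [ih r (c - 1) _ _ _ (le_trans (dfsAuxA_zeros_le _ _ _ _ _)
              (le_trans (dfsAuxA_zeros_le _ _ _ _ _) (by omega)))]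
        rw [ih (r - 1) c _ _ _ (le_trans (dfsAuxA_zeros_le _ _ _ _ _)
              (le_trans (dfsAuxA_zeros_le _ _ _ _ _)
                (le_trans (dfsAuxA_zeros_le _ _ _ _ _) (by omega))))]
        rw [dfsLoopB_fuel_irrel f grid st _ _ (f + 1)
              (le_trans (dfsAuxA_zeros_le _ _ _ _ _)
                (le_trans (dfsAuxA_zeros_le _ _ _ _ _)
                  (le_trans (dfsAuxA_zeros_le _ _ _ _ _)
                    (le_trans (dfsAuxA_zeros_le _ _ _ _ _) (by omega)))))
              (le_trans (dfsAuxA_zeros_le _ _ _ _ _)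
                (le_trans (dfsAuxA_zeros_le _ _ _ _ _)
                  (le_trans (dfsAuxA_zeros_le _ _ _ _ _)
                    (le_trans (dfsAuxA_zeros_le _ _ _ _ _) (by omega)))))]
        congr 1
        ring

-- ===== VERDICT (by name: the statement is the Claim_ definition above) =====
theorem dfs_spec : Claim_equal_dfs := by
  intro grid row col visited _ _
  unfold Spec_dfs dfs dfs_alt
  rw [dfs_main (pvZeros visited) grid row col visited [] 0 (le_refl _)]
  simp [dfsLoopB]
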